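-- pv_equiv track=rewrite | github.com/imewei/homodyne-analysis | homodyne/tests/test_automated_qa_pipeline.py | _check_import_organization
-- ===== SOURCE A (Python) =====
-- def _check_import_organization(lines: list[str]) -> int:
--     """Check import statement organization."""
--     violations = 0
--     import_section = True
--
--     for line in lines:
--         stripped = line.strip()
--         if not stripped or stripped.startswith("#"):
--             continue
--
--         if stripped.startswith(("import ", "from ")):
--             if not import_section:
--                 violations += 1  # Import after non-import code
--         else:
--             import_section = False
--
--     return violations
-- ===== SOURCE B (Python) =====
-- def _check_import_organization(lines: list[str]) -> int:
--     """Check import statement organization."""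
--     def is_skip(s):
--         return not s or s.startswith("#")
--
--     def is_import(s):
--         return s.startswith("import ") or s.startswith("from ")
--
--     stripped = [line.strip() for line in lines]
--     first_code = next(
--         (i for i, s in enumerate(stripped) if not is_skip(s) and not is_import(s)),
--         None,
--     )
--     if first_code is None:
--         return 0
--     return sum(1 for s in stripped[first_code + 1:] if is_import(s))
-- ===== Notes on version B (the rewrite author's own statement) =====
-- stated objective: alternative
-- what changed: Replaced the single stateful flag-flipping pass with a two-phase decomposition: find the index of the first non-skip, non-import line, then count import lines strictly after it (0 if there is none).
import Mathlib
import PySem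

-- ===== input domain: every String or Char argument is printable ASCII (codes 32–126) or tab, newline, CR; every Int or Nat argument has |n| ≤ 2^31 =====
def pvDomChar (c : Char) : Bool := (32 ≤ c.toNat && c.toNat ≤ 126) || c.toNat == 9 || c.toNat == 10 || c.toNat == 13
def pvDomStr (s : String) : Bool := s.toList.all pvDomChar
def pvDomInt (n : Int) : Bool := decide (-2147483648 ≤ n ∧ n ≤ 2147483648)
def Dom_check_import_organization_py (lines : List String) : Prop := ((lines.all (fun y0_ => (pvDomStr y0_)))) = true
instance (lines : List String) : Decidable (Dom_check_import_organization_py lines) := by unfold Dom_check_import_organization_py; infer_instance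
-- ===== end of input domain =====

-- B restructures A's single flag-flipping pass as: find the first "real code" line, then count imports after it.

-- ===== PORT A =====
-- literal port of A: fold over the lines carrying (violations, import_section)
def check_import_organization_py (lines : List String) : Int :=
  let st := lines.foldl (fun (st : Int × Bool) line =>
    let stripped := PySem.Str.strip line
    if stripped = "" ∨ PySem.Str.startswith stripped "#" then st
    else if PySem.Str.startswith stripped "import " ∨ PySem.Str.startswith stripped "from " then
      if !st.2 then (st.1 + 1, st.2) else st
    else (st.1, false)) (0, true)
  st.1

-- ===== PORT B =====
def pvIsSkip (s : String) : Bool := s = "" || PySem.Str.startswith s "#"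
def pvIsImport (s : String) : Bool := PySem.Str.startswith s "import " || PySem.Str.startswith s "from "

def check_import_organization_py_alt (lines : List String) : Int :=
  let stripped := lines.map PySem.Str.strip
  match stripped.findIdx? (fun s => !pvIsSkip s && !pvIsImport s) with
  | none => 0
  | some first_code => ((stripped.drop (first_code + 1)).countP pvIsImport : Int)

-- ===== PRECONDITION & SPEC =====
def Spec_check_import_organization_py (lines : List String) (out : Int) : Prop := out = check_import_organization_py_alt lines
instance (lines : List String) (out : Int) : Decidable (Spec_check_import_organization_py lines out) := by unfold Spec_check_import_organization_py; infer_instance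

-- ===== CLAIM (what is proved, stated in full; the proofs are below) =====
def Claim_equal_check_import_organization_py : Prop := ∀ (lines : List String), Dom_check_import_organization_py lines → Spec_check_import_organization_py lines (check_import_organization_py lines)

-- ===== LEMMAS AND PROOFS =====

-- A's fold step, abstracted (definitionally the lambda of port A)
def pvStepA (st : Int × Bool) (line : String) : Int × Bool :=
  let stripped := PySem.Str.strip line
  if stripped = "" ∨ PySem.Str.startswith stripped "#" then st
  else if PySem.Str.startswith stripped "import " ∨ PySem.Str.startswith stripped "from " then
    if !st.2 then (st.1 + 1, st.2) else st
  else (st.1, false)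

-- B's result on a list of already-stripped lines
def pvAltB (ss : List String) : Int :=
  match ss.findIdx? (fun s => !pvIsSkip s && !pvIsImport s) with
  | none => 0
  | some i => ((ss.drop (i + 1)).countP pvIsImport : Int)

lemma pvAltB_cons (s : String) (ss : List String) :
    pvAltB (s :: ss) =
      if !pvIsSkip s && !pvIsImport s then ((ss.countP pvIsImport : Int))
      else pvAltB ss := by
  unfold pvAltB
  rw [List.findIdx?_cons]
  by_cases h : (!pvIsSkip s && !pvIsImport s) = true
  · simp [h]
  · simp only [h, if_false, Bool.false_eq_true]
    cases hfi : ss.findIdx? (fun s => !pvIsSkip s && !pvIsImport s) with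
    | none => simp
    | some i => simp

lemma pvSkip_not_import (s : String) (h : pvIsSkip s = true) : pvIsImport s = false := by
  unfold pvIsSkip at h
  unfold pvIsImport
  simp only [Bool.or_eq_true, decide_eq_true_eq] at h
  rcases h with h | h
  · subst h; decide
  · obtain ⟨t, ht⟩ := (PySem.Chars.startswith_iff _ _).mp (by simpa using h)
    have h1 : PySem.Str.startswith s "import " = false := by
      rw [Bool.eq_false_iff]
      intro hc
      obtain ⟨u, hu⟩ := (PySem.Chars.startswith_iff _ _).mp (by simpa using hc)
      rw [← ht] at hu; simp at hu
    have h2 : PySem.Str.startswith s "from " = false := by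
      rw [Bool.eq_false_iff]
      intro hc
      obtain ⟨u, hu⟩ := (PySem.Chars.startswith_iff _ _).mp (by simpa using hc)
      rw [← ht] at hu; simp at hu
    rw [h1, h2]; rfl

lemma pvStepA_eq (st : Int × Bool) (line : String) :
    pvStepA st line =
      if pvIsSkip (PySem.Str.strip line) then st
      else if pvIsImport (PySem.Str.strip line) then
        if !st.2 then (st.1 + 1, st.2) else st
      else (st.1, false) := by
  unfold pvStepA pvIsSkip pvIsImport
  simp only [Bool.or_eq_true, decide_eq_true_eq]

-- after import_section has been cleared, A just counts import lines
lemma foldl_false (ss : List String) (v : Int) :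
    (ss.foldl pvStepA (v, false)).1 = v + ((ss.map PySem.Str.strip).countP pvIsImport : Int) := by
  induction ss generalizing v with
  | nil => simp
  | cons s ss ih =>
    rw [List.foldl_cons, pvStepA_eq, List.map_cons, List.countP_cons]
    by_cases hskip : pvIsSkip (PySem.Str.strip s) = true
    · rw [if_pos hskip, ih]
      simp [pvSkip_not_import _ hskip]
    · rw [if_neg hskip]
      by_cases himp : pvIsImport (PySem.Str.strip s) = true
      · rw [if_pos himp]
        rw [show (if (!((v : Int), false).2) = true then (((v : Int), false).1 + 1, ((v : Int), false).2)
                 else ((v : Int), false)) = ((v : Int) + 1, false) from rfl]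
        rw [ih]
        simp [himp]
        ring
      · rw [if_neg himp]
        rw [show (((v : Int), false).1, false) = ((v : Int), false) from rfl]
        rw [ih]
        simp [himp]

-- while import_section is still set, A computes B's two-phase answer
lemma foldl_true (ss : List String) (v : Int) :
    (ss.foldl pvStepA (v, true)).1 = v + pvAltB (ss.map PySem.Str.strip) := by
  induction ss generalizing v with
  | nil => simp [pvAltB]
  | cons s ss ih =>
    rw [List.foldl_cons, pvStepA_eq, List.map_cons, pvAltB_cons]
    by_cases hskip : pvIsSkip (PySem.Str.strip s) = true
    · rw [if_pos hskip, ih]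
      simp [hskip]
    · rw [if_neg hskip]
      by_cases himp : pvIsImport (PySem.Str.strip s) = true
      · rw [if_pos himp]
        rw [show (if (!((v : Int), true).2) = true then (((v : Int), true).1 + 1, ((v : Int), true).2)
                 else ((v : Int), true)) = ((v : Int), true) from rfl]
        rw [ih]
        simp [hskip, himp]
      · rw [if_neg himp]
        rw [show (((v : Int), true).1, false) = ((v : Int), false) from rfl]
        rw [foldl_false]
        simp [hskip, himp]

-- ===== VERDICT (by name: the statement is the Claim_ definition above) =====
theorem check_import_organization_py_spec : Claim_equal_check_import_organization_py := by
  intro lines _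
  unfold Spec_check_import_organization_py
  show (lines.foldl pvStepA ((0 : Int), true)).1 = check_import_organization_py_alt lines
  rw [foldl_true]
  have halt : check_import_organization_py_alt lines = pvAltB (lines.map PySem.Str.strip) := rfl
  rw [halt]
  ring
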